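-- pv_equiv track=rewrite | github.com/rsusny-wq/infinitra-dixon-chatbot | cdk-infrastructure/lambda/vin_extractor.py | _basic_vin_check
-- ===== SOURCE A (Python) =====
-- def _basic_vin_check(candidate: str) -> bool:
--     """Basic check if a string could be a VIN"""
--     if len(candidate) != 17:
--         return False
--
--     # VINs don't contain I, O, or Q
--     if any(char in candidate for char in ['I', 'O', 'Q']):
--         return False
--
--     # Should be alphanumeric
--     if not candidate.isalnum():
--         return False
--
--     # Should have some letters and some numbers
--     has_letter = any(c.isalpha() for c in candidate)
--     has_digit = any(c.isdigit() for c in candidate)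
--
--     return has_letter and has_digit
-- ===== SOURCE B (Python) =====
-- def _basic_vin_check(candidate: str) -> bool:
--     """Basic check if a string could be a VIN (single-pass version)"""
--     if len(candidate) != 17:
--         return False
--     all_alnum = True
--     has_letter = False
--     has_digit = False
--     for c in candidate:
--         if c in ('I', 'O', 'Q'):
--             return False
--         all_alnum = all_alnum and c.isalnum()
--         has_letter = has_letter or c.isalpha()
--         has_digit = has_digit or c.isdigit()
--     return all_alnum and has_letter and has_digit
-- ===== Notes on version B (the rewrite author's own statement) =====
-- stated objective: simpler
-- what changed: Replaces the four separate scans (substring membership test, str.isalnum, two any() passes) with one loop over the characters that short-circuits on I/O/Q and accumulates all_alnum/has_letter/has_digit flags.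
import Mathlib
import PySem

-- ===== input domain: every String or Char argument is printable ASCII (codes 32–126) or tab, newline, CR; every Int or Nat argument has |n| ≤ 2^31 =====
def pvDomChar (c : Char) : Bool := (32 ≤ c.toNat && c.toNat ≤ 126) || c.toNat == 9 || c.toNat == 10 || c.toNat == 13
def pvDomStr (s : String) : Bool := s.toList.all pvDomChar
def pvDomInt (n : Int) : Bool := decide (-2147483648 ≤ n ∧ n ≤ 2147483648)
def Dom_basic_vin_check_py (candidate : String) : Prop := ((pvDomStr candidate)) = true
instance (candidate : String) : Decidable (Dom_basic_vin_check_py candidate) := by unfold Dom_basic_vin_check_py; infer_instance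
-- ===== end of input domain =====

-- B replaces A's four separate scans with one single-pass loop accumulating three flags; objective: simpler.

-- ===== PORT A =====
def basic_vin_check_py (candidate : String) : Bool :=
  if PySem.Str.len candidate ≠ 17 then false
  else if ["I", "O", "Q"].any (fun ch => PySem.Str.isIn ch candidate) then false
  else if !PySem.Str.strIsalnum candidate then false
  else
    let has_letter := candidate.toList.any (fun c => PySem.Chars.isalpha c)
    let has_digit := candidate.toList.any (fun c => PySem.Chars.isdigit c)
    has_letter && has_digit

-- ===== PORT B =====
-- the single for-loop of Source B: early-return false on I/O/Q, else carry the three flags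
def vinScan : List Char → Bool → Bool → Bool → Bool
  | [], all_alnum, has_letter, has_digit => all_alnum && has_letter && has_digit
  | c :: rest, all_alnum, has_letter, has_digit =>
    if c = 'I' || c = 'O' || c = 'Q' then false
    else vinScan rest (all_alnum && PySem.Chars.isalnum c)
                      (has_letter || PySem.Chars.isalpha c)
                      (has_digit || PySem.Chars.isdigit c)

def basic_vin_check_py_alt (candidate : String) : Bool :=
  if PySem.Str.len candidate ≠ 17 then false
  else vinScan candidate.toList true false false

-- ===== PRECONDITION & SPEC =====
def Spec_basic_vin_check_py (candidate : String) (out : Bool) : Prop := out = basic_vin_check_py_alt candidate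
instance (candidate : String) (out : Bool) : Decidable (Spec_basic_vin_check_py candidate out) := by unfold Spec_basic_vin_check_py; infer_instance

-- ===== CLAIM (what is proved, stated in full; the proofs are below) =====
def Claim_equal_basic_vin_check_py : Prop := ∀ (candidate : String), Dom_basic_vin_check_py candidate → Spec_basic_vin_check_py candidate (basic_vin_check_py candidate)

-- ===== LEMMAS AND PROOFS =====

theorem singleton_infix_iff_mem {α : Type} {a : α} {l : List α} : [a] <:+: l ↔ a ∈ l := by
  constructor
  · rintro ⟨s, t, rfl⟩; simp
  · intro h
    obtain ⟨s, t, rfl⟩ := List.append_of_mem h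
    exact ⟨s, t, by simp⟩

theorem isIn_single (c : Char) (t s : String) (ht : t.toList = [c]) :
    PySem.Str.isIn t s = s.toList.contains c := by
  have h := PySem.Str.isIn_iff_infix t s
  rw [ht, singleton_infix_iff_mem] at h
  cases hc : s.toList.contains c
  · have hnm : c ∉ s.toList := by
      intro hm
      have hcm := List.contains_iff_mem.mpr hm
      rw [hc] at hcm
      exact Bool.false_ne_true hcm
    exact (Bool.not_eq_true _).mp (fun hT => hnm (h.mp hT))
  · exact h.mpr (List.contains_iff_mem.mp hc)
theorem vinScan_eq (L : List Char) (aln hl hd : Bool) :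
    vinScan L aln hl hd =
      if L.any (fun c => c = 'I' || c = 'O' || c = 'Q') then false
      else (aln && L.all PySem.Chars.isalnum) && (hl || L.any PySem.Chars.isalpha)
            && (hd || L.any PySem.Chars.isdigit) := by
  induction L generalizing aln hl hd with
  | nil => simp [vinScan]
  | cons c rest ih =>
    by_cases hc : c = 'I' || c = 'O' || c = 'Q'
    · simp [vinScan, hc]
    · simp only [vinScan, hc, ih, List.any_cons, List.all_cons]
      rw [if_neg (by simp [hc])]
      by_cases hrest : rest.any (fun c => c = 'I' || c = 'O' || c = 'Q')
      · simp [hrest]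
      · rw [if_neg hrest, if_neg (show ¬ _ = true by
          simp only [Bool.false_or]; exact hrest)]
        ac_rfl

-- ===== VERDICT (by name: the statement is the Claim_ definition above) =====
theorem basic_vin_check_py_spec : Claim_equal_basic_vin_check_py := by
  intro cand _
  show basic_vin_check_py cand = basic_vin_check_py_alt cand
  unfold basic_vin_check_py basic_vin_check_py_alt
  by_cases hlen : PySem.Str.len cand = 17
  · rw [if_neg (not_not_intro hlen), if_neg (not_not_intro hlen), vinScan_eq]
    have hne : cand.toList ≠ [] := by
      intro h; rw [PySem.Str.len_eq, h] at hlen; simp at hlen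
    have hE : cand.toList.isEmpty = false := by
      simpa [List.isEmpty_iff] using hne
    simp only [List.any_cons, List.any_nil, Bool.or_false]
    rw [isIn_single 'I' "I" cand rfl, isIn_single 'O' "O" cand rfl,
        isIn_single 'Q' "Q" cand rfl]
    by_cases hforb :
        (cand.toList.any fun c => decide (c = 'I') || decide (c = 'O') || decide (c = 'Q')) = true
    · have hc : (cand.toList.contains 'I' || (cand.toList.contains 'O'
          || cand.toList.contains 'Q')) = true := by
        simp only [List.any_eq_true, Bool.or_eq_true, decide_eq_true_eq] at hforb
        obtain ⟨c, hcm, hco⟩ := hforb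
        rcases hco with (rfl | rfl) | rfl <;> simp <;> tauto
      rw [if_pos hc, if_pos hforb]
    · rw [Bool.not_eq_true] at hforb
      simp only [List.any_eq_false] at hforb
      have hI : cand.toList.contains 'I' = false := by
        cases hctn : cand.toList.contains 'I'
        · rfl
        · have h2 := hforb _ (List.contains_iff_mem.mp hctn); simp at h2
      have hO : cand.toList.contains 'O' = false := by
        cases hctn : cand.toList.contains 'O'
        · rfl
        · have h2 := hforb _ (List.contains_iff_mem.mp hctn); simp at h2
      have hQ : cand.toList.contains 'Q' = false := by
        cases hctn : cand.toList.contains 'Q'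
        · rfl
        · have h2 := hforb _ (List.contains_iff_mem.mp hctn); simp at h2
      have hc : (cand.toList.contains 'I' || (cand.toList.contains 'O'
          || cand.toList.contains 'Q')) = false := by rw [hI, hO, hQ]; rfl
      have hforb' : (cand.toList.any fun c =>
          decide (c = 'I') || decide (c = 'O') || decide (c = 'Q')) = false := by
        simp only [List.any_eq_false]; intro x hx; simpa using hforb x hx
      simp only [hc, hforb']
      rw [if_neg Bool.false_ne_true, if_neg Bool.false_ne_true]
      rw [PySem.Str.strIsalnum_eq]
      simp only [PySem.Chars.strIsalnum, hE, Bool.not_false, Bool.true_and, Bool.false_or]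
      by_cases haln : cand.toList.all PySem.Chars.isalnum = true
      · simp only [haln, Bool.not_true, Bool.true_and]
        rw [if_neg Bool.false_ne_true]
      · rw [Bool.not_eq_true] at haln
        simp [haln]
  · rw [if_pos hlen, if_pos hlen]
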